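-- pv_equiv track=rewrite | github.com/revjkee/aethernova | core-systems/chronowatch-core/chronowatch/scheduler/cron_parser.py | _replace_names
-- ===== SOURCE A (Python) =====
-- def _replace_names(field: str, mapping: dict[str, str]) -> str:
--     """
--     Заменяет текстовые имена (JAN, MON, …) на цифры с сохранением
--     сложных конструкций вида: MON-FRI, MON,WED,FRI,*/2 и т.п.
--     """
--     def repl_token(token: str) -> str:
--         # поддержим диапазоны с именами: MON-FRI
--         if "-" in token and "/" not in token:
--             a, b = token.split("-", 1)
--             a2 = mapping.get(a.lower(), a)
--             b2 = mapping.get(b.lower(), b)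
--             return f"{a2}-{b2}"
--         # простая подстановка
--         return mapping.get(token.lower(), token)
--
--     # Токенизация по «разделителям cron»
--     out = []
--     buf = ""
--     for ch in field:
--         if ch in ",/":
--             if buf:
--                 out.append(repl_token(buf))
--                 buf = ""
--             out.append(ch)
--         else:
--             buf += ch
--     if buf:
--         out.append(repl_token(buf))
--     return "".join(out)
-- ===== SOURCE B (Python) =====
-- def _replace_names(field: str, mapping: dict[str, str]) -> str:
--     def repl_token(token: str) -> str:
--         if "-" in token and "/" not in token:
--             a, b = token.split("-", 1)
--             a2 = mapping.get(a.lower(), a)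
--             b2 = mapping.get(b.lower(), b)
--             return f"{a2}-{b2}"
--         return mapping.get(token.lower(), token)
--
--     # Scan maximal runs between delimiters with two indices; no buffer/flush state.
--     out = []
--     i, n = 0, len(field)
--     while i < n:
--         ch = field[i]
--         if ch in ",/":
--             out.append(ch)
--             i += 1
--         else:
--             j = i + 1
--             while j < n and field[j] not in ",/":
--                 j += 1
--             out.append(repl_token(field[i:j]))
--             i = j
--     return "".join(out)
-- ===== Notes on version B (the rewrite author's own statement) =====
-- stated objective: alternative
-- what changed: Replaced A's char-by-char buffer-accumulate-and-flush tokenizer with a two-index run scanner that extracts each maximal non-delimiter run as a slice in one step; repl_token is reused verbatim.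
import Mathlib
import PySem

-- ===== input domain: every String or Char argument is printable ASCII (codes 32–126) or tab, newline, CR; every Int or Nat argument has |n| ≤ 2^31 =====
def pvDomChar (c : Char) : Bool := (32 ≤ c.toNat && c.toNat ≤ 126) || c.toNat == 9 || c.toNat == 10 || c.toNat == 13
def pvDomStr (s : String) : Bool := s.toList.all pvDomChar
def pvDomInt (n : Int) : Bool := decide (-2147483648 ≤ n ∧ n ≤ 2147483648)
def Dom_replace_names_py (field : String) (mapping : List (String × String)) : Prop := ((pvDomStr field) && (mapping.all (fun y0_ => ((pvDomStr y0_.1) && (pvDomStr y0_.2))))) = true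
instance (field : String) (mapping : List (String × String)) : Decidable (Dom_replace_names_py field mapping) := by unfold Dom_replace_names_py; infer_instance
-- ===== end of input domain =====

-- B replaces A's buffer-accumulate-and-flush loop by a two-index maximal-run scanner; same result (alternative decomposition, no speed claim).

-- shared helper: both Pythons define repl_token identically (B reuses it verbatim)
def pvRepl (mapping : List (String × String)) (token : String) : String :=
  let ts := token.toList
  if ts.contains '-' && !ts.contains '/' then
    -- token.split("-", 1): part before the first '-', part after it
    let a := ts.takeWhile (fun c => !(c == '-'))
    let b := (ts.dropWhile (fun c => !(c == '-'))).drop 1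
    let a2 := PySem.Dict.getD (PySem.Dict.mk mapping) (PySem.Str.lower (String.ofList a)) (String.ofList a)
    let b2 := PySem.Dict.getD (PySem.Dict.mk mapping) (PySem.Str.lower (String.ofList b)) (String.ofList b)
    String.ofList (a2.toList ++ '-' :: b2.toList)   -- f"{a2}-{b2}"
  else
    PySem.Dict.getD (PySem.Dict.mk mapping) (PySem.Str.lower token) token

-- ===== PORT A =====
-- the for-loop over field with state (out, buf); final flush of buf
def pvALoop (mapping : List (String × String)) (out : List String) (buf : List Char) : List Char → List String
  | [] => if buf.isEmpty then out else out ++ [pvRepl mapping (String.ofList buf)]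
  | c :: cs =>
    if c == ',' || c == '/' then
      pvALoop mapping
        ((if buf.isEmpty then out else out ++ [pvRepl mapping (String.ofList buf)]) ++ [String.ofList [c]])
        [] cs
    else
      pvALoop mapping out (buf ++ [c]) cs

def replace_names_py (field : String) (mapping : List (String × String)) : String :=
  PySem.Str.join "" (pvALoop mapping [] [] field.toList)

-- ===== PORT B =====
-- "field[j] not in ',/'" — the run-continuation test of Source B's inner while
def pvNd (c : Char) : Bool := !(c == ',' || c == '/')

-- the outer while of Source B: a delimiter is emitted alone; otherwise the maximal
-- run field[i:j] is taken in one step (takeWhile/dropWhile = the inner while)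
def pvBGroups (mapping : List (String × String)) : List Char → List String
  | [] => []
  | c :: cs =>
    if c == ',' || c == '/' then
      String.ofList [c] :: pvBGroups mapping cs
    else
      pvRepl mapping (String.ofList (c :: cs.takeWhile pvNd)) :: pvBGroups mapping (cs.dropWhile pvNd)
  termination_by cs => cs.length
  decreasing_by
    · simp
    · have := List.length_dropWhile_le (p := pvNd) (l := cs)
      simp; omega

def replace_names_py_alt (field : String) (mapping : List (String × String)) : String :=
  PySem.Str.join "" (pvBGroups mapping field.toList)

-- ===== PRECONDITION & SPEC =====
def Spec_replace_names_py (field : String) (mapping : List (String × String)) (out : String) : Prop := out = replace_names_py_alt field mapping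
instance (field : String) (mapping : List (String × String)) (out : String) : Decidable (Spec_replace_names_py field mapping out) := by unfold Spec_replace_names_py; infer_instance

-- ===== CLAIM (what is proved, stated in full; the proofs are below) =====
def Claim_equal_replace_names_py : Prop := ∀ (field : String) (mapping : List (String × String)), Dom_replace_names_py field mapping → Spec_replace_names_py field mapping (replace_names_py field mapping)

-- ===== LEMMAS AND PROOFS =====
-- A's loop state (out, buf) equals "emitted groups so far ++ groups of (buf ++ rest)"
lemma pvALoop_eq (mapping : List (String × String)) (cs : List Char) :
    ∀ out buf, pvALoop mapping out buf cs =
      out ++ (if buf.isEmpty then pvBGroups mapping cs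
              else pvRepl mapping (String.ofList (buf ++ cs.takeWhile pvNd)) ::
                   pvBGroups mapping (cs.dropWhile pvNd)) := by
  induction cs with
  | nil =>
    intro out buf
    cases buf <;> simp [pvALoop, pvBGroups]
  | cons c cs ih =>
    intro out buf
    by_cases hc : (c == ',' || c == '/') = true
    · have hnd : pvNd c = false := by simp [pvNd, hc]
      rw [pvALoop, if_pos hc, ih, pvBGroups]
      cases buf <;> simp [hc, hnd, pvBGroups]
    · have hnd : pvNd c = true := by simp [pvNd]; simpa using hc
      rw [pvALoop, if_neg hc, ih, pvBGroups]
      cases buf <;> simp [hc, hnd]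

-- ===== VERDICT (by name: the statement is the Claim_ definition above) =====
theorem replace_names_py_spec : Claim_equal_replace_names_py := by
  intro field mapping _
  unfold Spec_replace_names_py replace_names_py replace_names_py_alt
  rw [pvALoop_eq]
  simp
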